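-- pv_equiv track=rewrite | github.com/leedy903/PS | 프로그래머스/3/64062. 징검다리 건너기/징검다리 건너기.py | solution
-- ===== SOURCE A (Python) =====
-- from collections import deque
--
-- def solution(stones, k):
--     max_stones = [stones[0]]
--     deq = deque([[stones[0], 0]])
--     for i in range(1, len(stones)):
--         stone = stones[i]
--         while len(deq) > 0 and deq[-1][0] < stone:
--             deq.pop()
--
--         deq.append([stone, i])
--
--         while i - deq[0][1] >= k:
--             deq.popleft()
--
--         max_stones.append(deq[0][0])
--     answer = min(max_stones[k - 1:])
--     return answer
-- ===== SOURCE B (Python) =====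
-- def solution(stones, k):
--     n = len(stones)
--     return min(max(stones[i:i + k]) for i in range(n - k + 1))
-- ===== Notes on version B (the rewrite author's own statement) =====
-- stated objective: simpler
-- what changed: Replaced the monotonic-deque sliding-window maximum plus an accumulated max_stones list with a one-line direct scan: the minimum over all window starts of the max of the k consecutive stones.
-- outside the precondition, e.g. on solution([5], 0): A returns 5, B raises ValueError
import Mathlib
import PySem

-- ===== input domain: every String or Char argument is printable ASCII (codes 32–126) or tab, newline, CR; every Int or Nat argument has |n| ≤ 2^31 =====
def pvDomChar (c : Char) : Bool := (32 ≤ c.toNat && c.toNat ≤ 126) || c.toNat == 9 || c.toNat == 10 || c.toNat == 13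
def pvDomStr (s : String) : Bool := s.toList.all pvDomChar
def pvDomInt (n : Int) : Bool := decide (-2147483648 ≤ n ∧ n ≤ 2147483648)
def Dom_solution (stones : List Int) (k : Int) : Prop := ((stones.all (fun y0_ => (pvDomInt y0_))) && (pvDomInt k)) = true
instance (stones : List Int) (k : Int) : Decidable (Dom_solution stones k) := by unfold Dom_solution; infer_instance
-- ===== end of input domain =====

-- B replaces A's monotonic-deque sliding-window maximum with a direct per-window scan (min over
-- window starts of the max of the k consecutive stones); objective: simpler.

-- ===== PORT A =====
-- literal port of A: deque of [stone, index] pairs, pop from the right while smaller,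
-- pop from the left while out of the window, collect window maxima, min of the tail slice.
def solution (stones : List Int) (k : Int) : Int :=
  match stones with
  | [] => 0  -- stones[0] raises IndexError here; excluded by Pre_solution
  | s0 :: _ =>
    let st := (PySem.List.pyRange 1 (stones.length) 1).foldl
      (fun (st : List Int × List (Int × Int)) i =>
        let stone := PySem.List.pyGetD stones i 0
        let deq := st.2.rdropWhile (fun p => decide (p.1 < stone))
        let deq := deq ++ [(stone, i)]
        let deq := deq.dropWhile (fun p => decide (i - p.2 ≥ k))
        (st.1 ++ [(deq.headD (0, 0)).1], deq))
      ([s0], [(s0, 0)])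
    (PySem.List.min? (PySem.List.slice st.1 (some (k - 1)) none) (fun x => x)).getD 0

-- ===== PORT B =====
def solution_alt (stones : List Int) (k : Int) : Int :=
  let n : Int := stones.length
  (PySem.List.min?
    ((PySem.List.pyRange 0 (n - k + 1) 1).map
      (fun i => (PySem.List.max? (PySem.List.slice stones (some i) (some (i + k))) (fun x => x)).getD 0))
    (fun x => x)).getD 0

-- ===== PRECONDITION & SPEC =====
-- Pre_ excludes empty stones and k outside 1..len(stones): there A raises (IndexError/ValueError)
-- and B raises ValueError, except the accidental single-stone k ≤ 0 case, where A's returned value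
-- is an artefact of negative-slice wraparound on max_stones[k-1:] and B raises ValueError.
def Pre_solution (stones : List Int) (k : Int) : Prop :=
  stones ≠ [] ∧ 1 ≤ k ∧ k ≤ stones.length
instance (stones : List Int) (k : Int) : Decidable (Pre_solution stones k) := by
  unfold Pre_solution; infer_instance

def pvWitness_solution : List Int × Int := ([2, 5, 3, 4], 2)

def Spec_solution (stones : List Int) (k : Int) (out : Int) : Prop := out = solution_alt stones k
instance (stones : List Int) (k : Int) (out : Int) : Decidable (Spec_solution stones k out) := by
  unfold Spec_solution; infer_instance

-- ===== CLAIM (what is proved, stated in full; the proofs are below) =====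
def Claim_equal_solution : Prop := ∀ (stones : List Int) (k : Int),
  Dom_solution stones k → Pre_solution stones k → Spec_solution stones k (solution stones k)

-- ===== LEMMAS AND PROOFS =====

-- stones[j] for an in-range Nat index
def pvG (stones : List Int) (j : Nat) : Int := stones.getD j 0
-- left end of the (truncated) window ending at t, for window size K
def pvLo (K t : Nat) : Nat := t + 1 - K
-- v is the maximum of stones over indices [pvLo K t, t]
def pvWinMax (stones : List Int) (K t : Nat) (v : Int) : Prop :=
  (∃ j, pvLo K t ≤ j ∧ j ≤ t ∧ v = pvG stones j) ∧
  (∀ l, pvLo K t ≤ l → l ≤ t → pvG stones l ≤ v)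

-- the loop body of port A, named for the proofs (identical to the port's lambda)
def pvStep (stones : List Int) (k : Int) (st : List Int × List (Int × Int)) (i : Int) :
    List Int × List (Int × Int) :=
  let stone := PySem.List.pyGetD stones i 0
  let deq := st.2.rdropWhile (fun p => decide (p.1 < stone))
  let deq := deq ++ [(stone, i)]
  let deq := deq.dropWhile (fun p => decide (i - p.2 ≥ k))
  (st.1 ++ [(deq.headD (0, 0)).1], deq)

-- the state of port A's loop after the range 1..m
def pvState (stones : List Int) (k s0 : Int) (m : Int) : List Int × List (Int × Int) :=
  (PySem.List.pyRange 1 m 1).foldl (pvStep stones k) ([s0], [(s0, 0)])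

def pvE (stones : List Int) (j : Nat) : Int × Int := (pvG stones j, (j : Int))

-- invariant of the deque after processing index i
def pvDeqInv (stones : List Int) (K i : Nat) (dq : List (Int × Int)) : Prop :=
  ∃ js : List Nat,
    dq = js.map (pvE stones) ∧
    js.Pairwise (· < ·) ∧
    (∀ j ∈ js, pvLo K i ≤ j ∧ j ≤ i) ∧
    i ∈ js ∧
    (∀ j ∈ js, ∀ l, j ≤ l → l ≤ i → pvG stones l ≤ pvG stones j) ∧
    (∀ l, pvLo K i ≤ l → l ≤ i → ∃ j ∈ js, l ≤ j ∧ pvG stones l ≤ pvG stones j)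

lemma pvWinMax_unique {stones : List Int} {K t : Nat} {v w : Int}
    (hv : pvWinMax stones K t v) (hw : pvWinMax stones K t w) : v = w := by
  obtain ⟨⟨jv, h1, h2, h3⟩, hv2⟩ := hv
  obtain ⟨⟨jw, g1, g2, g3⟩, hw2⟩ := hw
  have := hw2 jv h1 h2
  have := hv2 jw g1 g2
  omega

-- head of the deque is the window max, given the invariant
lemma pvDeqInv_head {stones : List Int} {K i : Nat} {dq : List (Int × Int)}
    (h : pvDeqInv stones K i dq) : pvWinMax stones K i ((dq.headD (0, 0)).1) := by
  obtain ⟨js, hdq, hpw, hbd, hmem, hP1, hP2⟩ := h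
  obtain ⟨j1, t, rfl⟩ : ∃ j1 t, js = j1 :: t := by
    cases js with
    | nil => simp at hmem
    | cons a b => exact ⟨a, b, rfl⟩
  subst hdq
  simp only [List.map_cons, List.headD_cons, pvE]
  constructor
  · exact ⟨j1, (hbd j1 (by simp)).1, (hbd j1 (by simp)).2, rfl⟩
  · intro l hl1 hl2
    obtain ⟨j, hj, hlj, hle⟩ := hP2 l hl1 hl2
    have hj1 : j1 ≤ j := by
      rcases List.mem_cons.mp hj with h | h
      · omega
      · have := (List.pairwise_cons.mp hpw).1 j h; omega
    have := hP1 j1 (by simp) j hj1 (hbd j hj).2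
    omega

lemma pv_dropWhile_map (f : Nat → Int × Int) (p : Int × Int → Bool) (l : List Nat) :
    (l.map f).dropWhile p = (l.dropWhile (fun x => p (f x))).map f := by
  simp [List.dropWhile_map]; rfl

lemma pv_rdropWhile_map (f : Nat → Int × Int) (p : Int × Int → Bool) (l : List Nat) :
    (l.map f).rdropWhile p = (l.rdropWhile (fun x => p (f x))).map f := by
  simp only [List.rdropWhile, ← List.map_reverse, pv_dropWhile_map]

lemma pv_mem_dropWhile {α : Type} {p : α → Bool} {l : List α} {x : α}
    (hx : x ∈ l) (hp : p x = false) : x ∈ l.dropWhile p := by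
  induction l with
  | nil => simp at hx
  | cons a t ih =>
    by_cases h : p a = true
    · rw [List.dropWhile_cons_of_pos h]
      rcases List.mem_cons.mp hx with rfl | hx'
      · rw [hp] at h; exact absurd h (by simp)
      · exact ih hx'
    · rw [List.dropWhile_cons_of_neg h]
      exact hx

lemma pv_dropWhile_head_not {α : Type} {p : α → Bool} {l : List α} {x : α} {xs : List α}
    (h : l.dropWhile p = x :: xs) : p x = false := by
  induction l with
  | nil => simp at h
  | cons a t ih =>
    by_cases hp : p a = true
    · rw [List.dropWhile_cons_of_pos hp] at h; exact ih h
    · rw [List.dropWhile_cons_of_neg hp] at h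
      cases h; simpa using hp

lemma pv_le_getLast {l : List Nat} (hp : l.Pairwise (· < ·)) {x : Nat} (hx : x ∈ l)
    (h : l ≠ []) : x ≤ l.getLast h := by
  obtain ⟨m, hm, rfl⟩ := List.mem_iff_getElem.mp hx
  rw [List.getLast_eq_getElem]
  rcases Nat.lt_or_ge m (l.length - 1) with hlt | hge
  · have := List.pairwise_iff_getElem.mp hp m (l.length - 1) hm (by omega) hlt
    omega
  · have : m = l.length - 1 := by omega
    subst this; exact le_refl _

-- the key step: one iteration of port A's loop preserves the deque invariant and
-- appends the window maximum to the accumulated list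
lemma pvStep_inv (stones : List Int) (K : Nat) (hK : 1 ≤ K) (i : Nat)
    (_hi : i + 1 < stones.length) (ms : List Int) (dq : List (Int × Int))
    (h : pvDeqInv stones K i dq) :
    ∃ dq', pvStep stones (K : Int) (ms, dq) ((i : Int) + 1) =
        (ms ++ [(dq'.headD (0, 0)).1], dq') ∧ pvDeqInv stones K (i + 1) dq' := by
  obtain ⟨js, hdq, hpw, hbd, hmem, hP1, hP2⟩ := h
  have hstone : PySem.List.pyGetD stones ((i : Int) + 1) 0 = pvG stones (i + 1) := by
    have hc : ((i : Int) + 1) = ((i + 1 : Nat) : Int) := by push_cast; ring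
    rw [hc, PySem.List.pyGetD_natCast]
    rfl
  set s : Int := pvG stones (i + 1) with hs
  set q : Nat → Bool := fun j => decide (pvG stones j < s) with hq
  set js1 := js.rdropWhile q with hjs1
  have hjs1pre : js1 <+: js := List.rdropWhile_prefix q js
  have hjs1sub : ∀ {x}, x ∈ js1 → x ∈ js := fun hx => hjs1pre.sublist.subset hx
  set js2 := js1 ++ [i + 1] with hjs2
  set r : Nat → Bool := fun j => decide (j + K ≤ i + 1) with hr
  set js3 := js2.dropWhile r with hjs3
  have hjs3suf : js3 <:+ js2 := List.dropWhile_suffix r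
  have hjs3sub : ∀ {x}, x ∈ js3 → x ∈ js2 := fun hx => hjs3suf.sublist.subset hx
  -- js1 elements are ≤ i, and pairwise
  have hjs1le : ∀ j ∈ js1, j ≤ i := fun j hj => (hbd j (hjs1sub hj)).2
  have hjs1pw : js1.Pairwise (· < ·) := hpw.sublist hjs1pre.sublist
  have hjs2pw : js2.Pairwise (· < ·) := by
    rw [hjs2, List.pairwise_append]
    refine ⟨hjs1pw, List.pairwise_singleton _ _, ?_⟩
    intro a ha b hb
    simp only [List.mem_singleton] at hb
    subst hb
    have := hjs1le a ha
    omega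
  have hjs3pw : js3.Pairwise (· < ·) := hjs2pw.sublist hjs3suf.sublist
  have hri1 : r (i + 1) = false := by simp [hr]; omega
  have hm3 : (i + 1) ∈ js3 := pv_mem_dropWhile (by simp [hjs2]) hri1
  obtain ⟨j1, t3, hj3⟩ : ∃ a b, js3 = a :: b := by
    cases hc : js3 with
    | nil => rw [hc] at hm3; simp at hm3
    | cons a b => exact ⟨a, b, rfl⟩
  have hj1r : r j1 = false := pv_dropWhile_head_not (hjs3 ▸ hj3)
  have hj1K : i + 1 < j1 + K := by simpa [hr] using hj1r
  -- membership in js3 from failing r (for elements of js2)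
  -- bounds for js3
  have hbd3 : ∀ j ∈ js3, pvLo K (i + 1) ≤ j ∧ j ≤ i + 1 := by
    intro j hj
    have hj2 : j ∈ js2 := hjs3sub hj
    have hup : j ≤ i + 1 := by
      rw [hjs2] at hj2
      rcases List.mem_append.mp hj2 with h1 | h1
      · have := hjs1le j h1; omega
      · simp at h1; omega
    have hlow : pvLo K (i + 1) ≤ j := by
      have : j1 ≤ j := by
        rw [hj3] at hj
        rcases List.mem_cons.mp hj with rfl | hj'
        · exact le_refl _
        · have := (List.pairwise_cons.mp (hj3 ▸ hjs3pw)).1 j hj'; omega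
      simp only [pvLo]; omega
    exact ⟨hlow, hup⟩
  -- P1 for js3
  have hP13 : ∀ j ∈ js3, ∀ l, j ≤ l → l ≤ i + 1 → pvG stones l ≤ pvG stones j := by
    intro j hj l hjl hli
    have hj2 : j ∈ js2 := hjs3sub hj
    rw [hjs2] at hj2
    rcases List.mem_append.mp hj2 with h1 | h1
    · -- j ∈ js1
      have hjs : j ∈ js := hjs1sub h1
      rcases Nat.lt_or_ge l (i + 1) with hl | hl
      · exact hP1 j hjs l hjl (by omega)
      · have hli1 : l = i + 1 := by omega
        subst hli1
        -- show s ≤ pvG stones j via the last of js1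
        have hne : js1 ≠ [] := List.ne_nil_of_mem h1
        have hlast := List.rdropWhile_last_not q js (by rw [← hjs1]; exact hne)
        set L := js1.getLast hne with hL
        have hLmem : L ∈ js1 := List.getLast_mem hne
        have hsL : s ≤ pvG stones L := by
          have : ¬ (pvG stones L < s) := by
            simpa [hq] using hlast
          omega
        have hjL : j ≤ L := pv_le_getLast hjs1pw h1 hne
        have := hP1 j hjs L hjL (hbd L (hjs1sub hLmem)).2
        omega
    · simp at h1; subst h1
      have : l = i + 1 := by omega
      subst this; exact le_refl _
  -- P2 for js3
  have hP23 : ∀ l, pvLo K (i + 1) ≤ l → l ≤ i + 1 →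
      ∃ j ∈ js3, l ≤ j ∧ pvG stones l ≤ pvG stones j := by
    intro l hl1 hl2
    rcases Nat.lt_or_ge l (i + 1) with hl | hl
    · have hlo : pvLo K i ≤ l := by simp only [pvLo] at hl1 ⊢; omega
      obtain ⟨j0, hj0, hlj0, hle0⟩ := hP2 l hlo (by omega)
      have hsplit : j0 ∈ js1 ++ js.rtakeWhile q := by
        rw [List.rdropWhile_append_rtakeWhile]; exact hj0
      rcases List.mem_append.mp hsplit with h1 | h1
      · -- j0 kept: it fails r, so it is in js3
        have hj0r : r j0 = false := by
          simp only [hr, decide_eq_false_iff_not]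
          simp only [pvLo] at hl1; omega
        exact ⟨j0, pv_mem_dropWhile (by rw [hjs2]; exact List.mem_append_left _ h1) hj0r,
          hlj0, hle0⟩
      · -- j0 popped: its stone is < s, use i+1 instead
        have : pvG stones j0 < s := by
          have := List.mem_rtakeWhile_imp h1
          simpa [hq] using this
        exact ⟨i + 1, hm3, by omega, by omega⟩
    · have : l = i + 1 := by omega
      subst this
      exact ⟨i + 1, hm3, le_refl _, le_refl _⟩
  refine ⟨js3.map (pvE stones), ?_, js3, rfl, hjs3pw, hbd3, hm3, hP13, hP23⟩
  -- the computation itself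
  have hE : pvE stones (i + 1) = (s, (i : Int) + 1) := by
    simp only [pvE, Prod.mk.injEq]
    exact ⟨rfl, by push_cast; ring⟩
  have hmap1 : (js.map (pvE stones)).rdropWhile (fun p => decide (p.1 < s)) =
      js1.map (pvE stones) := by
    rw [pv_rdropWhile_map]; rfl
  have hmap2 : (js2.map (pvE stones)).dropWhile
      (fun p => decide ((i : Int) + 1 - p.2 ≥ (K : Int))) = js3.map (pvE stones) := by
    have hpred : (fun x => decide ((i : Int) + 1 - (pvE stones x).2 ≥ (K : Int))) = r := by
      funext j
      simp only [pvE, hr]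
      rw [decide_eq_decide]
      omega
    rw [pv_dropWhile_map, hpred, hjs3]
  have hsing : [pvE stones (i + 1)] = List.map (pvE stones) [i + 1] := by simp
  simp only [pvStep, hstone, hdq, hmap1]
  rw [← hE, hsing, ← List.map_append, ← hjs2, hmap2]

-- the loop invariant of port A
lemma pvLoop_inv (stones : List Int) (K : Nat) (hK : 1 ≤ K) (s0 : Int)
    (hs0 : pvG stones 0 = s0) :
    ∀ m : Nat, 1 ≤ m → m ≤ stones.length →
      (pvState stones (K : Int) s0 (m : Int)).1.length = m ∧
      (∀ t, t < m → pvWinMax stones K t ((pvState stones (K : Int) s0 (m : Int)).1.getD t 0)) ∧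
      pvDeqInv stones K (m - 1) (pvState stones (K : Int) s0 (m : Int)).2 := by
  intro m
  induction m with
  | zero => omega
  | succ m ih =>
    intro _ hle
    rcases Nat.eq_or_lt_of_le (Nat.one_le_iff_ne_zero.mpr (Nat.succ_ne_zero m)) with h1 | h1
    · -- base case m + 1 = 1
      have hm0 : m = 0 := by omega
      subst hm0
      have hnil : PySem.List.pyRange 1 ((1 : Nat) : Int) 1 = [] :=
        PySem.List.pyRange_one_eq_nil (by norm_num)
      have hstate : pvState stones (K : Int) s0 ((1 : Nat) : Int) = ([s0], [(s0, 0)]) := by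
        simp only [pvState, hnil, List.foldl_nil]
      rw [hstate]
      refine ⟨rfl, ?_, ?_⟩
      · intro t ht
        have : t = 0 := by omega
        subst this
        refine ⟨⟨0, by simp [pvLo]; omega, by omega, by simp [hs0]⟩, ?_⟩
        intro l hl1 hl2
        have : l = 0 := by omega
        subst this; simp [hs0]
      · refine ⟨[0], ?_, ?_, ?_, ?_, ?_, ?_⟩
        · simp [pvE, hs0]
        · simp
        · intro j hj; simp at hj; subst hj; constructor
          · simp [pvLo]; omega
          · simp
        · simp
        · intro j hj l hl1 hl2; simp at hj; subst hj
          have : l = 0 := by omega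
          subst this; exact le_refl _
        · intro l hl1 hl2
          have : l = 0 := by omega
          subst this; exact ⟨0, by simp, le_refl _, le_refl _⟩
    · -- inductive step: m ≥ 1
      have hm1 : 1 ≤ m := by omega
      obtain ⟨hlen, hwin, hdeq⟩ := ih hm1 (by omega)
      have hrange : PySem.List.pyRange 1 ((m + 1 : Nat) : Int) 1 =
          PySem.List.pyRange 1 ((m : Nat) : Int) 1 ++ [((m : Nat) : Int)] := by
        have : ((m + 1 : Nat) : Int) = ((m : Nat) : Int) + 1 := by push_cast; ring
        rw [this]
        exact PySem.List.pyRange_one_succ_right (by exact_mod_cast hm1)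
      have hstate : pvState stones (K : Int) s0 ((m + 1 : Nat) : Int) =
          pvStep stones (K : Int) (pvState stones (K : Int) s0 ((m : Nat) : Int)) ((m : Nat) : Int) := by
        simp only [pvState, hrange, List.foldl_append, List.foldl_cons, List.foldl_nil]
      have hcast : (((m - 1 : Nat)) : Int) + 1 = ((m : Nat) : Int) := by omega
      have hdeq' : pvDeqInv stones K (m - 1) (pvState stones (K : Int) s0 ((m : Nat) : Int)).2 := hdeq
      obtain ⟨dq', heq, hinv⟩ := pvStep_inv stones K hK (m - 1) (by omega)
        (pvState stones (K : Int) s0 ((m : Nat) : Int)).1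
        (pvState stones (K : Int) s0 ((m : Nat) : Int)).2 hdeq'
      rw [hcast] at heq
      have hstate2 : pvState stones (K : Int) s0 ((m + 1 : Nat) : Int) =
          ((pvState stones (K : Int) s0 ((m : Nat) : Int)).1 ++ [(dq'.headD (0, 0)).1], dq') := by
        rw [hstate, ← heq]
      have hminv : pvDeqInv stones K m dq' := by
        have : m - 1 + 1 = m := by omega
        rwa [this] at hinv
      rw [hstate2]
      have hwm : pvWinMax stones K m ((dq'.headD (0, 0)).1) := pvDeqInv_head hminv
      refine ⟨by simp [hlen], ?_, by simpa using hminv⟩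
      intro t ht
      rcases Nat.lt_or_ge t m with htm | htm
      · have hgd : ((pvState stones (K : Int) s0 ((m : Nat) : Int)).1 ++
            [(dq'.headD (0, 0)).1]).getD t 0 =
            (pvState stones (K : Int) s0 ((m : Nat) : Int)).1.getD t 0 := by
          rw [List.getD_append _ _ _ _ (by omega)]
        rw [hgd]
        exact hwin t htm
      · have htm' : t = m := by omega
        have hgd : ((pvState stones (K : Int) s0 ((m : Nat) : Int)).1 ++
            [(dq'.headD (0, 0)).1]).getD m 0 = (dq'.headD (0, 0)).1 := by
          rw [List.getD_eq_getElem?_getD, List.getElem?_append_right (by omega)]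
          simp [hlen]
        rw [htm', hgd]
        exact hwm
  -- (Nat.succ case covers both the base and the step)

-- B's window scan computes the window maximum
lemma pvB_winmax (stones : List Int) (K a : Nat) (hK : 1 ≤ K) (h : a + K ≤ stones.length) :
    pvWinMax stones K (a + K - 1)
      ((PySem.List.max? ((stones.drop a).take K) (fun x => x)).getD 0) := by
  set w := (stones.drop a).take K with hw
  have hlenw : w.length = K := by
    simp [hw]; omega
  have hne : w ≠ [] := by
    intro hnil; rw [hnil] at hlenw; simp at hlenw; omega
  obtain ⟨m, hm⟩ : ∃ m, PySem.List.max? w (fun x => x) = some m := by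
    cases hc : PySem.List.max? w (fun x => x) with
    | none => exact absurd ((PySem.List.max?_eq_none_iff w _).mp hc) hne
    | some m => exact ⟨m, rfl⟩
  rw [hm, Option.getD_some]
  have hwget : ∀ u (hu : u < K), w[u]'(by rw [hlenw]; omega) = pvG stones (a + u) := by
    intro u hu
    have hau : a + u < stones.length := by omega
    have : w[u]'(by rw [hlenw]; omega) = stones[a + u]'hau := by
      simp [hw, List.getElem_take, List.getElem_drop]
    rw [this, pvG, List.getD_eq_getElem _ _ hau]
  have hmem := PySem.List.max?_mem hm
  have hmax := PySem.List.max?_isMax hm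
  have hlo : pvLo K (a + K - 1) = a := by simp [pvLo]; omega
  constructor
  · obtain ⟨u, hu, hum⟩ := List.mem_iff_getElem.mp hmem
    refine ⟨a + u, by omega, by omega, ?_⟩
    rw [← hum, hwget u (by omega)]
  · intro l hl1 hl2
    rw [hlo] at hl1
    have hu : l - a < K := by omega
    have : pvG stones l = w[l - a]'(by rw [hlenw]; omega) := by
      rw [hwget (l - a) hu]; congr 1; omega
    rw [this]
    have := hmax _ (List.getElem_mem (l := w) (by rw [hlenw]; omega))
    simpa using this

-- ===== VERDICT (by name: the statement is the Claim_ definition above) =====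
theorem solution_spec : Claim_equal_solution := by
  intro stones k _ hpre
  obtain ⟨hne, hk1, hkn⟩ := hpre
  obtain ⟨s0, rest, rfl⟩ : ∃ s0 rest, stones = s0 :: rest := by
    cases stones with
    | nil => exact absurd rfl hne
    | cons a b => exact ⟨a, b, rfl⟩
  set stones := s0 :: rest with hstones
  set n := stones.length with hn
  set K := k.toNat with hK
  have hkK : k = (K : Int) := by omega
  have hK1 : 1 ≤ K := by omega
  have hKn : K ≤ n := by
    have : (n : Int) = stones.length := by simp [hn]
    omega
  have hn1 : 1 ≤ n := by simp [hn, hstones]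
  have hs0 : pvG stones 0 = s0 := rfl
  obtain ⟨hlen, hwin, _⟩ := pvLoop_inv stones K hK1 s0 hs0 n hn1 (le_refl n)
  set ms := (pvState stones (K : Int) s0 (n : Int)).1 with hms
  -- A's value
  have hA : solution stones k =
      (PySem.List.min? (PySem.List.slice ms (some (k - 1)) none) (fun x => x)).getD 0 := by
    rw [hkK]; rfl
  -- B's value
  have hB : solution_alt stones k =
      (PySem.List.min?
        ((PySem.List.pyRange 0 ((n : Int) - k + 1) 1).map
          (fun i => (PySem.List.max? (PySem.List.slice stones (some i) (some (i + k)))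
            (fun x => x)).getD 0))
        (fun x => x)).getD 0 := rfl
  have hslice : PySem.List.slice ms (some (k - 1)) none = ms.drop (K - 1) := by
    rw [PySem.List.slice_from ms (by omega)]
    congr 1
    omega
  -- the two lists coincide
  have hlists : ms.drop (K - 1) =
      (PySem.List.pyRange 0 ((n : Int) - k + 1) 1).map
        (fun i => (PySem.List.max? (PySem.List.slice stones (some i) (some (i + k)))
          (fun x => x)).getD 0) := by
    have hlenB : ((PySem.List.pyRange 0 ((n : Int) - k + 1) 1)).length = n - K + 1 := by
      rw [PySem.List.length_pyRange_one]
      omega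
    apply List.ext_getElem
    · simp [hlen, hlenB]; omega
    · intro t h1 h2
      have htn : t < n - K + 1 := by
        simp [hlenB] at h2; omega
      have hidx : K - 1 + t < n := by omega
      -- left side: the window max recorded by A's loop
      have hL : (ms.drop (K - 1))[t]'h1 = ms.getD (K - 1 + t) 0 := by
        rw [List.getElem_drop, List.getD_eq_getElem _ _ (by omega)]
      have hwinL : pvWinMax stones K (K - 1 + t) (ms.getD (K - 1 + t) 0) :=
        hwin (K - 1 + t) (by omega)
      -- right side: B's direct window max
      have hR : ((PySem.List.pyRange 0 ((n : Int) - k + 1) 1).map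
          (fun i => (PySem.List.max? (PySem.List.slice stones (some i) (some (i + k)))
            (fun x => x)).getD 0))[t]'h2 =
          (PySem.List.max? ((stones.drop t).take K) (fun x => x)).getD 0 := by
        rw [List.getElem_map]
        have hidx2 : (PySem.List.pyRange 0 ((n : Int) - k + 1) 1)[t]'(by omega) = 0 + (t : Int) :=
          PySem.List.getElem_pyRange_one (h := by omega)
        rw [hidx2]
        have : (0 : Int) + (t : Int) = ((t : Nat) : Int) := by omega
        rw [this]
        have hkc : ((t : Nat) : Int) + k = ((t : Nat) : Int) + ((K : Nat) : Int) := by omega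
        rw [hkc, PySem.List.slice_natCast_add stones t K]
      rw [hL, hR]
      have hwinR : pvWinMax stones K (t + K - 1)
          ((PySem.List.max? ((stones.drop t).take K) (fun x => x)).getD 0) :=
        pvB_winmax stones K t hK1 (by omega)
      have hidx3 : t + K - 1 = K - 1 + t := by omega
      rw [hidx3] at hwinR
      exact pvWinMax_unique hwinL hwinR
  rw [Spec_solution, hA, hB, hslice, hlists]
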